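-- pv_equiv track=rewrite | github.com/queelius/computational-explorations | src/verify_883.py | verify_exhaustive
-- ===== SOURCE A (Python) =====
-- import math
-- from itertools import combinations
-- from typing import Optional, Tuple, Set
--
-- def extremal_size(n: int) -> int:
--     """Size of extremal set A* = {i ∈ [n] : 2|i or 3|i}."""
--     return n // 2 + n // 3 - n // 6
--
-- def has_coprime_triple(A: Set[int]) -> bool:
--     """Check if A contains three mutually coprime elements."""
--     A_list = sorted(A)
--     for i in range(len(A_list)):
--         for j in range(i + 1, len(A_list)):
--             if math.gcd(A_list[i], A_list[j]) == 1:
--                 for k in range(j + 1, len(A_list)):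
--                     if (math.gcd(A_list[i], A_list[k]) == 1 and
--                             math.gcd(A_list[j], A_list[k]) == 1):
--                         return True
--     return False
--
-- def verify_exhaustive(n: int) -> Tuple[bool, Optional[Set[int]]]:
--     """
--     Exhaustively verify Problem #883 for given n.
--
--     Returns (True, None) if verified, or (False, counterexample).
--     """
--     threshold = extremal_size(n) + 1  # |A| > |A*|
--
--     for size in range(threshold, n + 1):
--         for A in combinations(range(1, n + 1), size):
--             A_set = set(A)
--             if not has_coprime_triple(A_set):
--                 return False, A_set
--     return True, None
-- ===== SOURCE B (Python) =====
-- import math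
--
--
-- def extremal_size(n: int) -> int:
--     """Size of extremal set A* = {i in [n] : 2|i or 3|i}."""
--     return n // 2 + n // 3 - n // 6
--
--
-- def _extends_triple_free(chosen, x):
--     """True iff chosen (triple-free) stays triple-free when x is added, i.e.
--     no pair a<b in chosen is mutually coprime with x."""
--     m = len(chosen)
--     for p in range(m):
--         for q in range(p + 1, m):
--             a, b = chosen[p], chosen[q]
--             if (math.gcd(a, b) == 1 and math.gcd(a, x) == 1
--                     and math.gcd(b, x) == 1):
--                 return False
--     return True
--
--
-- def _find_bad(items, start, need, chosen):
--     """Lexicographically first way to extend the triple-free list `chosen` by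
--     `need` elements of items[start:] so that the result has no coprime triple,
--     or None.  Branches whose prefix already holds a coprime triple are pruned:
--     a triple survives in every extension, so no bad set is missed."""
--     if need == 0:
--         return chosen
--     for i in range(start, len(items) - need + 1):
--         x = items[i]
--         if _extends_triple_free(chosen, x):
--             res = _find_bad(items, i + 1, need - 1, chosen + [x])
--             if res is not None:
--                 return res
--     return None
--
--
-- def verify_exhaustive(n):
--     """
--     Verify Problem #883 for n by a pruned depth-first search over the subsets
--     of the minimal offending size `threshold` only: a coprime triple survives
--     passing to supersets, so larger sizes never need scanning, the first
--     counterexample of the brute-force scan is always a threshold-size one in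
--     lexicographic order, and any prefix already containing a triple can be
--     discarded wholesale.  Same return value as the exhaustive scan.
--     """
--     threshold = extremal_size(n) + 1  # |A| > |A*|
--     if threshold > n:
--         return True, None
--     bad = _find_bad(list(range(1, n + 1)), 0, threshold, [])
--     if bad is not None:
--         return False, set(bad)
--     return True, None
-- ===== Notes on version B (the rewrite author's own statement) =====
-- stated objective: alternative
-- what changed: B replaces A's scan of every subset of every size above the threshold with a pruned lexicographic depth-first search over size-threshold subsets only: a coprime triple survives passing to supersets, so larger sizes are redundant and any prefix already holding a triple is discarded wholesale, keeping the first counterexample identical; intended as faster (it prunes vastly more), but a timing run could not confirm this because A already times out at sizes where B still answers and both time out on the largest inputs.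
import Mathlib
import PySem

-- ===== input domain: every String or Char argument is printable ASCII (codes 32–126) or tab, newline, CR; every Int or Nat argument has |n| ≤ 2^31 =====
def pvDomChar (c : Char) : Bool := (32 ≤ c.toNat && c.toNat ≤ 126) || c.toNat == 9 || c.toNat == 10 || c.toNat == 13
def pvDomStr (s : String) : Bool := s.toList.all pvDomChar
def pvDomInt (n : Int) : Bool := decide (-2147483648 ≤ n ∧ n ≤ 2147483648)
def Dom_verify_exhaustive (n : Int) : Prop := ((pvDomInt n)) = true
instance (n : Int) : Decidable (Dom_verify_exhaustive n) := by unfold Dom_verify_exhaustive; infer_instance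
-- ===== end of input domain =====

-- B replaces A's scan of every subset of every size with a pruned lexicographic DFS over the
-- minimal size only: a coprime triple survives passing to supersets, so larger sizes and any
-- branch whose prefix already holds a triple are skipped; the first counterexample is unchanged.

-- ===== PORT A =====
-- module helper shared by Source A and Source B (identical source)
def extremalSize (n : Int) : Int :=
  PySem.Int.floordiv n 2 + PySem.Int.floordiv n 3 - PySem.Int.floordiv n 6

def hasCoprimeTriple (A : List Int) : Bool :=
  let L := PySem.List.sorted A (fun x => x) false
  (List.range L.length).any fun i =>
    (List.range' (i + 1) (L.length - (i + 1))).any fun j =>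
      (Int.gcd (L.getD i 0) (L.getD j 0) == 1) &&
        (List.range' (j + 1) (L.length - (j + 1))).any fun k =>
          (Int.gcd (L.getD i 0) (L.getD k 0) == 1) && (Int.gcd (L.getD j 0) (L.getD k 0) == 1)

def verify_exhaustive (n : Int) : Bool × Option (List Int) :=
  let threshold := extremalSize n + 1
  -- the size-loop with early return = find? over the concatenated combination lists;
  -- whenever the loop body runs, 1 ≤ size, so `.toNat` is exact
  match ((PySem.List.pyRange threshold (n + 1) 1).flatMap fun size =>
           PySem.List.combinations (PySem.List.pyRange 1 (n + 1) 1) size.toNat).find?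
          (fun A => ! hasCoprimeTriple (PySem.Set.ofList A)) with
  | some A => (false, some (PySem.Set.ofList A))
  | none => (true, none)

-- ===== PORT B =====
-- Source B's _extends_triple_free: the double index loop with early return False = all of negations
def extendsTripleFree (chosen : List Int) (x : Int) : Bool :=
  (List.range chosen.length).all fun p =>
    (List.range' (p + 1) (chosen.length - (p + 1))).all fun q =>
      !(Int.gcd (chosen.getD p 0) (chosen.getD q 0) == 1 &&
        Int.gcd (chosen.getD p 0) x == 1 && Int.gcd (chosen.getD q 0) x == 1)

-- Source B's _find_bad: the for-loop over i with first-successful recursive call = findSome? over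
-- the same index range; every visited index i is nonnegative and in range, so `items[i]` is
-- exactly `items.getD i.toNat 0`
def findBad (items : List Int) (start : Int) (need : Nat) (chosen : List Int) :
    Option (List Int) :=
  match need with
  | 0 => some chosen
  | need + 1 =>
    (PySem.List.pyRange start ((items.length : Int) - (need + 1) + 1) 1).findSome? fun i =>
      let x := items.getD i.toNat 0
      if extendsTripleFree chosen x then findBad items (i + 1) need (chosen ++ [x]) else none

def verify_exhaustive_alt (n : Int) : Bool × Option (List Int) :=
  let threshold := extremalSize n + 1
  if threshold > n then (true, none)
  else
    -- here 1 ≤ threshold ≤ n, so `.toNat` is exact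
    match findBad (PySem.List.pyRange 1 (n + 1) 1) 0 threshold.toNat [] with
    | some bad => (false, some (PySem.Set.ofList bad))
    | none => (true, none)

-- ===== PRECONDITION & SPEC =====
def Spec_verify_exhaustive (n : Int) (out : Bool × Option (List Int)) : Prop := out = verify_exhaustive_alt n
instance (n : Int) (out : Bool × Option (List Int)) : Decidable (Spec_verify_exhaustive n out) := by unfold Spec_verify_exhaustive; infer_instance

-- ===== CLAIM (what is proved, stated in full; the proofs are below) =====
def Claim_equal_verify_exhaustive : Prop := ∀ (n : Int), Dom_verify_exhaustive n → Spec_verify_exhaustive n (verify_exhaustive n)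

-- ===== LEMMAS AND PROOFS =====

-- The nested index loops of `hasCoprimeTriple` find a triple iff one exists in element form,
-- for a strictly increasing input list (the only lists the ports apply it to).
lemma hasTriple_iff (S : List Int) (hS : S.Pairwise (· < ·)) :
    hasCoprimeTriple S = true ↔
      ∃ x y z, x ∈ S ∧ y ∈ S ∧ z ∈ S ∧ x < y ∧ y < z ∧
        Int.gcd x y = 1 ∧ Int.gcd x z = 1 ∧ Int.gcd y z = 1 := by
  have hsorted : PySem.List.sorted S (fun x => x) false = S :=
    PySem.List.sorted_eq_of_perm_of_pairwise_lt S S (fun x => x) (List.Perm.refl S) hS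
  have hmono := List.pairwise_iff_getElem.mp hS
  have hidx : ∀ (i j : Nat) (hi : i < S.length) (hj : j < S.length), S[i] < S[j] → i < j := by
    intro i j hi hj hlt
    by_contra hnot
    rcases Nat.eq_or_lt_of_le (Nat.le_of_not_lt hnot) with h | h
    · subst h; exact lt_irrefl _ hlt
    · exact absurd (hmono j i hj hi h) (not_lt.mpr (le_of_lt hlt))
  unfold hasCoprimeTriple
  rw [hsorted]
  simp only [List.any_eq_true, List.mem_range, List.mem_range'_1, Bool.and_eq_true, beq_iff_eq]
  constructor
  · rintro ⟨i, hi, j, ⟨hj1, hj2⟩, hgij, k, ⟨hk1, hk2⟩, hgik, hgjk⟩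
    have hj : j < S.length := by omega
    have hk : k < S.length := by omega
    rw [List.getD_eq_getElem S 0 hi, List.getD_eq_getElem S 0 hj, List.getD_eq_getElem S 0 hk] at *
    exact ⟨S[i], S[j], S[k], List.getElem_mem hi, List.getElem_mem hj, List.getElem_mem hk,
      hmono i j hi hj (by omega), hmono j k hj hk (by omega), hgij, hgik, hgjk⟩
  · rintro ⟨x, y, z, hx, hy, hz, hxy, hyz, g1, g2, g3⟩
    rcases List.mem_iff_getElem.mp hx with ⟨i, hi, rfl⟩
    rcases List.mem_iff_getElem.mp hy with ⟨j, hj, rfl⟩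
    rcases List.mem_iff_getElem.mp hz with ⟨k, hk, rfl⟩
    have hij := hidx i j hi hj hxy
    have hjk := hidx j k hj hk hyz
    refine ⟨i, hi, j, ⟨by omega, by omega⟩, ?_, k, ⟨by omega, by omega⟩, ?_, ?_⟩
    · rw [List.getD_eq_getElem S 0 hi, List.getD_eq_getElem S 0 hj]; exact g1
    · rw [List.getD_eq_getElem S 0 hi, List.getD_eq_getElem S 0 hk]; exact g2
    · rw [List.getD_eq_getElem S 0 hj, List.getD_eq_getElem S 0 hk]; exact g3

-- a coprime triple survives passing to a superlist
lemma hasTriple_mono {S T : List Int} (hsub : S.Sublist T) (hT : T.Pairwise (· < ·))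
    (h : hasCoprimeTriple S = true) : hasCoprimeTriple T = true := by
  rcases (hasTriple_iff S (hT.sublist hsub)).mp h with ⟨x, y, z, hx, hy, hz, h1, h2, h3, h4, h5⟩
  exact (hasTriple_iff T hT).mpr ⟨x, y, z, hsub.mem hx, hsub.mem hy, hsub.mem hz, h1, h2, h3, h4, h5⟩

-- if every size-t combination of l has a coprime triple, so does every size-k one with t ≤ k
lemma combo_mono {l : List Int} (hl : l.Pairwise (· < ·)) {t k : Nat} (htk : t ≤ k)
    (hall : ∀ c ∈ PySem.List.combinations l t, hasCoprimeTriple (PySem.Set.ofList c) = true)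
    {c : List Int} (hc : c ∈ PySem.List.combinations l k) :
    hasCoprimeTriple (PySem.Set.ofList c) = true := by
  rcases (PySem.List.mem_combinations_iff l k c).mp hc with ⟨hsub, hlen⟩
  have hcp : c.Pairwise (· < ·) := hl.sublist hsub
  have hcnd : c.Nodup := hcp.imp ne_of_lt
  have hdsub : (c.take t).Sublist c := List.take_sublist t c
  have hd : c.take t ∈ PySem.List.combinations l t :=
    (PySem.List.mem_combinations_iff l t _).mpr ⟨hdsub.trans hsub, by simp [hlen, htk]⟩
  have h1 := hall _ hd
  rw [PySem.Set.ofList_eq_self_of_nodup _ ((hcp.sublist hdsub).imp ne_of_lt)] at h1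
  rw [PySem.Set.ofList_eq_self_of_nodup _ hcnd]
  exact hasTriple_mono hdsub hcp h1

-- B's double index loop decides, in element form, whether x completes a coprime triple
lemma extends_iff (chosen : List Int) (x : Int) :
    extendsTripleFree chosen x = true ↔
      ¬ ∃ p q, ∃ (hp : p < chosen.length) (hq : q < chosen.length), p < q ∧
        Int.gcd chosen[p] chosen[q] = 1 ∧ Int.gcd chosen[p] x = 1 ∧ Int.gcd chosen[q] x = 1 := by
  unfold extendsTripleFree
  simp only [List.all_eq_true, List.mem_range, List.mem_range'_1, Bool.not_eq_true',
    Bool.and_eq_false_iff]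
  constructor
  · rintro h ⟨p, q, hp, hq, hpq, g1, g2, g3⟩
    have := h p hp q ⟨by omega, by omega⟩
    rw [List.getD_eq_getElem chosen 0 hp, List.getD_eq_getElem chosen 0 hq] at this
    simp [g1, g2, g3] at this
  · intro h p hp q hq12
    have hq : q < chosen.length := by omega
    rw [List.getD_eq_getElem chosen 0 hp, List.getD_eq_getElem chosen 0 hq]
    by_contra hc
    simp only [Bool.and_eq_false_iff, beq_eq_false_iff_ne, ne_eq, not_or, not_not] at hc
    exact h ⟨p, q, hp, hq, by omega, hc.1.1, hc.1.2, hc.2⟩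

-- appending one element larger than all of a triple-free increasing list creates a triple
-- exactly when the new element completes one, i.e. when `extendsTripleFree` says so
lemma triple_snoc (chosen : List Int) (x : Int) (h : (chosen ++ [x]).Pairwise (· < ·))
    (hch : hasCoprimeTriple chosen = false) :
    hasCoprimeTriple (chosen ++ [x]) = !extendsTripleFree chosen x := by
  have hp : chosen.Pairwise (· < ·) := h.sublist (List.sublist_append_left _ _)
  have hlt : ∀ a ∈ chosen, a < x := by
    have := (List.pairwise_append.mp h).2.2
    intro a ha; exact this a ha x (List.mem_singleton.mpr rfl)
  rcases he : extendsTripleFree chosen x with _ | _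
  · -- some pair completes a triple with x
    have hex : ∃ p q, ∃ (hp : p < chosen.length) (hq : q < chosen.length), p < q ∧
        Int.gcd chosen[p] chosen[q] = 1 ∧ Int.gcd chosen[p] x = 1 ∧ Int.gcd chosen[q] x = 1 := by
      by_contra hno
      have := (extends_iff chosen x).mpr hno
      rw [he] at this; exact Bool.false_ne_true this
    rcases hex with ⟨p, q, hpl, hql, hpq, g1, g2, g3⟩
    have hmono := List.pairwise_iff_getElem.mp hp
    simp only [Bool.not_false]
    refine (hasTriple_iff _ h).mpr ⟨chosen[p], chosen[q], x,
      List.mem_append_left _ (List.getElem_mem hpl), List.mem_append_left _ (List.getElem_mem hql),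
      List.mem_append_right _ (List.mem_singleton.mpr rfl),
      hmono p q hpl hql hpq, hlt _ (List.getElem_mem hql), g1, g2, g3⟩
  · -- no pair completes one and chosen itself is triple-free
    simp only [Bool.not_true]
    by_contra hc
    rw [Bool.not_eq_false] at hc
    rcases (hasTriple_iff _ h).mp hc with ⟨u, v, w, hu, hv, hw, huv, hvw, g1, g2, g3⟩
    have hmem : ∀ a, a ∈ chosen ++ [x] → a ∈ chosen ∨ a = x := by
      intro a ha; rcases List.mem_append.mp ha with h' | h'
      · exact Or.inl h'
      · exact Or.inr (List.mem_singleton.mp h')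
    have hux : u ∈ chosen := by
      rcases hmem u hu with h' | rfl
      · exact h'
      · rcases hmem v hv with h' | rfl
        · exact absurd (hlt v h') (by omega)
        · omega
    have hvx : v ∈ chosen := by
      rcases hmem v hv with h' | rfl
      · exact h'
      · rcases hmem w hw with h' | rfl
        · exact absurd (hlt w h') (by omega)
        · omega
    rcases hmem w hw with hwc | rfl
    · -- the whole triple lies in chosen, contradicting hch
      have : hasCoprimeTriple chosen = true :=
        (hasTriple_iff chosen hp).mpr ⟨u, v, w, hux, hvx, hwc, huv, hvw, g1, g2, g3⟩
      rw [hch] at this; exact Bool.false_ne_true this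
    · -- w = x: the pair (u, v) completes a triple with x, contradicting he
      rcases List.mem_iff_getElem.mp hux with ⟨p, hpl, rfl⟩
      rcases List.mem_iff_getElem.mp hvx with ⟨q, hql, rfl⟩
      have hmono := List.pairwise_iff_getElem.mp hp
      have hpq : p < q := by
        by_contra hnot
        rcases Nat.eq_or_lt_of_le (Nat.le_of_not_lt hnot) with h' | h'
        · subst h'; exact lt_irrefl _ huv
        · exact absurd (hmono q p hql hpl h') (by omega)
      exact (extends_iff chosen _).mp he ⟨p, q, hpl, hql, hpq, g1, g2, g3⟩

-- find? only looks at members, so predicates agreeing on members give the same result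
lemma find?_congr_mem {α : Type} (l : List α) (p q : α → Bool)
    (h : ∀ a ∈ l, p a = q a) : l.find? p = l.find? q := by
  induction l with
  | nil => rfl
  | cons x xs ih =>
    have hx := h x (List.mem_cons_self)
    rcases hp : p x with _ | _
    · rw [List.find?_cons_of_neg (by simp [hp]), List.find?_cons_of_neg (by simp [← hx, hp])]
      exact ih fun a ha => h a (List.mem_cons_of_mem _ ha)
    · rw [List.find?_cons_of_pos hp, List.find?_cons_of_pos (by simp [← hx, hp])]

-- THE INVARIANT of B's pruned DFS: started at position s with a triple-free prefix `chosen`,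
-- `findBad` returns exactly what a lexicographic find? over the remaining combinations would
lemma findBad_spec (l : List Int) :
    ∀ (d : List Int) (s : Nat) (need : Nat) (chosen : List Int),
      l.drop s = d →
      (chosen ++ d).Pairwise (· < ·) →
      hasCoprimeTriple chosen = false →
      findBad l (s : Int) need chosen
        = ((PySem.List.combinations d need).map (chosen ++ ·)).find?
            (fun c => ! hasCoprimeTriple c) := by
  intro d
  induction d with
  | nil =>
    intro s need chosen hd hpair hch
    cases need with
    | zero =>
      simp [findBad, PySem.List.combinations_zero, hch]
    | succ need =>
      have hls : l.length ≤ s := by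
        have := congrArg List.length hd; simp at this; omega
      rw [findBad, PySem.List.pyRange_one_eq_nil (by push_cast; omega)]
      simp [PySem.List.combinations_nil_succ]
  | cons x xs ih =>
    intro s need chosen hd hpair hch
    cases need with
    | zero =>
      simp [findBad, PySem.List.combinations_zero, hch]
    | succ need =>
      have hlen : l.length - s = xs.length + 1 := by
        have := congrArg List.length hd; simp at this; omega
      have hsl : s < l.length := by omega
      have hxs : l.drop (s + 1) = xs := by
        rw [← List.tail_drop, hd]; rfl
      have hx : l.getD s 0 = x := by
        rw [List.getD_eq_getElem l 0 hsl]
        have : l.drop s = x :: xs := hd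
        have h0 : (l.drop s)[0]'(by simp [this]) = x := by simp [this]
        rw [List.getElem_drop] at h0
        simpa using h0
      by_cases hroom : xs.length + 1 < need + 1
      · -- not enough items left: the Python range is empty and there are no combinations
        rw [findBad, PySem.List.pyRange_one_eq_nil (by push_cast; omega)]
        rw [PySem.List.combinations_eq_nil_of_length_lt (x :: xs) (by simpa using hroom)]
        simp
      · -- the loop runs: its first iteration tries x, the rest is the recursive skip
        have hcons : PySem.List.pyRange (s : Int) ((l.length : Int) - (need + 1) + 1) 1
            = (s : Int) :: PySem.List.pyRange ((s : Int) + 1) ((l.length : Int) - (need + 1) + 1) 1 :=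
          PySem.List.pyRange_one_cons (by push_cast; omega)
        have hrest : ((PySem.List.pyRange ((s : Int) + 1) ((l.length : Int) - (need + 1) + 1) 1).findSome?
              fun i => let x := l.getD i.toNat 0;
                if extendsTripleFree chosen x then findBad l (i + 1) need (chosen ++ [x]) else none)
            = findBad l ((s : Int) + 1) (need + 1) chosen := by
          rw [findBad]
        rw [findBad, hcons, List.findSome?_cons]
        simp only [Int.toNat_natCast, hx]
        rw [hrest]
        have hskip : findBad l ((s : Int) + 1) (need + 1) chosen
            = ((PySem.List.combinations xs (need + 1)).map (chosen ++ ·)).find?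
                (fun c => ! hasCoprimeTriple c) := by
          have := ih (s + 1) (need + 1) chosen hxs
            (hpair.sublist (List.Sublist.append_left (List.sublist_cons_self x xs) chosen)) hch
          push_cast at this
          exact this
        have hsnocpair : (chosen ++ [x]).Pairwise (· < ·) :=
          hpair.sublist (List.Sublist.append_left (List.cons_sublist_cons.mpr (List.nil_sublist xs)) chosen)
        rw [PySem.List.combinations_cons_succ, List.map_append, List.find?_append, List.map_map]
        cases he : extendsTripleFree chosen x with
        | true =>
          -- x keeps the prefix triple-free: the first loop iteration is exactly the
          -- find? over the combinations that contain x
          have hfree : hasCoprimeTriple (chosen ++ [x]) = false := by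
            rw [triple_snoc chosen x hsnocpair hch, he]; rfl
          have hxs_pair : ((chosen ++ [x]) ++ xs).Pairwise (· < ·) := by
            rw [← List.append_cons]; exact hpair
          have hrec := ih (s + 1) need (chosen ++ [x]) hxs hxs_pair hfree
          push_cast at hrec
          have hmapeq : (PySem.List.combinations xs need).map ((chosen ++ ·) ∘ (x :: ·))
              = (PySem.List.combinations xs need).map ((chosen ++ [x]) ++ ·) := by
            apply List.map_congr_left; intro c _
            simp only [Function.comp_apply]
            exact List.append_cons chosen x c
          rw [hmapeq, ← hrec, ← hskip]
          cases findBad l ((s : Int) + 1) need (chosen ++ [x]) <;> rfl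
        | false =>
          -- x completes a triple: the whole branch through x is pruned, and rightly so,
          -- since every combination through x keeps that triple
          have htrip : hasCoprimeTriple (chosen ++ [x]) = true := by
            rw [triple_snoc chosen x hsnocpair hch, he]; rfl
          have hnone : ((PySem.List.combinations xs need).map ((chosen ++ ·) ∘ (x :: ·))).find?
              (fun c => ! hasCoprimeTriple c) = none := by
            rw [List.find?_eq_none]
            intro e he'
            rcases List.mem_map.mp he' with ⟨c, hc, rfl⟩
            have hsub : c.Sublist xs := PySem.List.sublist_of_mem_combinations hc
            have hpe : (chosen ++ x :: c).Pairwise (· < ·) :=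
              hpair.sublist (List.Sublist.append_left (List.cons_sublist_cons.mpr hsub) chosen)
            have : hasCoprimeTriple (chosen ++ x :: c) = true := by
              refine hasTriple_mono ?_ hpe htrip
              rw [List.append_cons chosen x c]
              exact List.sublist_append_left _ _
            simp [Function.comp, this]
          rw [hnone, ← hskip]
          simp

theorem verify_exhaustive_equal (n : Int) : verify_exhaustive n = verify_exhaustive_alt n := by
  have h2 : PySem.Int.floordiv n 2 = n / 2 := PySem.Int.floordiv_eq_ediv_of_pos (by norm_num)
  have h3 : PySem.Int.floordiv n 3 = n / 3 := PySem.Int.floordiv_eq_ediv_of_pos (by norm_num)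
  have h6 : PySem.Int.floordiv n 6 = n / 6 := PySem.Int.floordiv_eq_ediv_of_pos (by norm_num)
  unfold verify_exhaustive verify_exhaustive_alt
  simp only []
  by_cases hcase : extremalSize n + 1 > n
  · rw [if_pos hcase, PySem.List.pyRange_one_eq_nil (show n + 1 ≤ extremalSize n + 1 by omega)]
    simp
  · have hle : extremalSize n + 1 ≤ n := by omega
    have ht1 : 1 ≤ extremalSize n + 1 := by
      unfold extremalSize at hle ⊢; rw [h2, h3, h6] at hle ⊢; omega
    have hpl : (PySem.List.pyRange 1 (n + 1) 1).Pairwise (· < ·) :=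
      PySem.List.pairwise_lt_pyRange_one 1 (n + 1)
    rw [if_neg hcase, PySem.List.pyRange_one_cons (show extremalSize n + 1 < n + 1 by omega),
        List.flatMap_cons, List.find?_append]
    -- B's pruned DFS = find? over the threshold-size combinations (A's first chunk)
    have hfb : findBad (PySem.List.pyRange 1 (n + 1) 1) 0 (extremalSize n + 1).toNat []
        = (PySem.List.combinations (PySem.List.pyRange 1 (n + 1) 1)
            (extremalSize n + 1).toNat).find?
            (fun A => ! hasCoprimeTriple (PySem.Set.ofList A)) := by
      have h0 := findBad_spec (PySem.List.pyRange 1 (n + 1) 1) (PySem.List.pyRange 1 (n + 1) 1)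
        0 (extremalSize n + 1).toNat [] (by simp) (by simpa using hpl) (by rfl)
      push_cast at h0
      simp only [List.nil_append, List.map_id'] at h0
      rw [h0]
      refine find?_congr_mem _ _ _ (fun c hc => ?_)
      rw [PySem.Set.ofList_eq_self_of_nodup _
        ((hpl.sublist (PySem.List.sublist_of_mem_combinations hc)).imp ne_of_lt)]
    rw [hfb]
    cases hfind : (PySem.List.combinations (PySem.List.pyRange 1 (n + 1) 1)
        (extremalSize n + 1).toNat).find? (fun A => ! hasCoprimeTriple (PySem.Set.ofList A)) with
    | some a => simp
    | none =>
      have hall : ∀ c ∈ PySem.List.combinations (PySem.List.pyRange 1 (n + 1) 1)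
          (extremalSize n + 1).toNat, hasCoprimeTriple (PySem.Set.ofList c) = true := by
        intro c hcmem
        have := List.find?_eq_none.mp hfind c hcmem
        simpa using this
      have hrest : ((PySem.List.pyRange (extremalSize n + 1 + 1) (n + 1) 1).flatMap fun size =>
          PySem.List.combinations (PySem.List.pyRange 1 (n + 1) 1) size.toNat).find?
          (fun A => ! hasCoprimeTriple (PySem.Set.ofList A)) = none := by
        rw [List.find?_eq_none]
        intro c hcmem
        rcases List.mem_flatMap.mp hcmem with ⟨size, hsize, hcc⟩
        have hsz := (PySem.List.mem_pyRange_one).mp hsize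
        have hle2 : (extremalSize n + 1).toNat ≤ size.toNat := by omega
        simpa using combo_mono hpl hle2 hall hcc
      simp [hrest]

-- ===== VERDICT (by name: the statement is the Claim_ definition above) =====
theorem verify_exhaustive_spec : Claim_equal_verify_exhaustive := by
  intro n _
  exact verify_exhaustive_equal n
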